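-- pv_equiv track=rewrite | github.com/ladybug-tools/honeybee-doe2 | honeybee_doe2/util.py | doe2_object_blocks
-- ===== SOURCE A (Python) =====
-- def doe2_object_blocks(inp_file_contents):
--     """Get the object blocks of a DOE-2 INP file.
--
--     Args:
--         inp_file_contents: A string of the INP file to parse.
--
--     Returns:
--         A list of strings, where each string is a complete block of the INP file.
--     """
--     blocks, buffer = [], []
--     ignore_blocks = ['INPUT', 'END', 'COMPUTE', 'STOP']
--
--     for line in inp_file_contents.splitlines():
--         buffer.append(line)
--         if line.strip().endswith('..'):
--             if not any(buffer[0].strip().startswith(b) for b in ignore_blocks):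
--                 blocks.append('\n'.join(buffer))
--                 buffer = []
--             else:
--                 buffer = []
--                 continue
--
--     if buffer:
--         blocks.append('\n'.join(buffer))
--
--     return blocks
-- ===== SOURCE B (Python) =====
-- def doe2_object_blocks(inp_file_contents):
--     """Get the object blocks of a DOE-2 INP file (index-table formulation)."""
--     lines = inp_file_contents.splitlines()
--     ends = [i for i, ln in enumerate(lines) if ln.strip().endswith('..')]
--     ignore = ('INPUT', 'END', 'COMPUTE', 'STOP')
--     blocks = []
--     start = 0
--     for e in ends:
--         seg = lines[start:e + 1]
--         if not seg[0].strip().startswith(ignore):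
--             blocks.append('\n'.join(seg))
--         start = e + 1
--     if start < len(lines):
--         blocks.append('\n'.join(lines[start:]))
--     return blocks
-- ===== Notes on version B (the rewrite author's own statement) =====
-- stated objective: alternative
-- what changed: Replaces A's single fold that carries a growing line buffer with a two-phase pass: first build an explicit table of block-terminator line indices, then walk that table with a moving start cursor, slicing each block out of the line list.
import Mathlib
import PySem

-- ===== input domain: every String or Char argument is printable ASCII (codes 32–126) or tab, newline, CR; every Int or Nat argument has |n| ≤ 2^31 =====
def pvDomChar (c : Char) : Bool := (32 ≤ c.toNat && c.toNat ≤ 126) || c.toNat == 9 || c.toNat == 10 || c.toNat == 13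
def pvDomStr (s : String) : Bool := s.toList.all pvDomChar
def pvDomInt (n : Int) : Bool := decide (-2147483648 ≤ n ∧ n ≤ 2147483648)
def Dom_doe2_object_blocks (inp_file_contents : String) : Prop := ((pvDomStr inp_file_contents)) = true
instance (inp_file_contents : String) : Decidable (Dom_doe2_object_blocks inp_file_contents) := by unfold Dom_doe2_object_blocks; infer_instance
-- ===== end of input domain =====

-- B builds an explicit table of block-terminator indices first and then slices the line list
-- between consecutive boundaries, instead of A's single fold carrying a growing buffer (objective: alternative).

-- ===== PORT A =====
-- shared by both ports (same constant list / predicates in both Python files)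
def pvIgnore : List String := ["INPUT", "END", "COMPUTE", "STOP"]

def pvIsEnd (l : String) : Bool := PySem.Str.endswith (PySem.Str.strip l) ".."

def pvIsIgn (l : String) : Bool := pvIgnore.any fun b => PySem.Str.startswith (PySem.Str.strip l) b

-- one iteration of A's for-loop; 'buffer[0]' is safe in Python (buffer just received 'line'),
-- ported as headD "" which is exact there
def pvStepA (st : List String × List String) (line : String) : List String × List String :=
  let buffer := st.2 ++ [line]
  if pvIsEnd line then
    if !pvIsIgn (buffer.headD "") then (st.1 ++ [PySem.Str.join "\n" buffer], [])
    else (st.1, [])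
  else (st.1, buffer)

def doe2_object_blocks (inp_file_contents : String) : List String :=
  let r := (PySem.Str.splitlines inp_file_contents).foldl pvStepA ([], [])
  if r.2 ≠ [] then r.1 ++ [PySem.Str.join "\n" r.2] else r.1

-- ===== PORT B =====
-- one iteration of B's for-loop over the boundary-index table; 'seg[0]' is safe in Python
-- (start ≤ e, so the slice is nonempty), ported as headD "" which is exact there
def pvStepB (lines : List String) (st : List String × Int) (e : Int) : List String × Int :=
  let seg := PySem.List.slice lines (some st.2) (some (e + 1))
  let blocks :=
    if !pvIsIgn (seg.headD "") then st.1 ++ [PySem.Str.join "\n" seg] else st.1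
  (blocks, e + 1)

def doe2_object_blocks_alt (inp_file_contents : String) : List String :=
  let lines := PySem.Str.splitlines inp_file_contents
  let ends := ((PySem.List.enumerate lines 0).filter fun p => pvIsEnd p.2).map (·.1)
  let r := ends.foldl (pvStepB lines) ([], 0)
  if r.2 < (lines.length : Int) then
    r.1 ++ [PySem.Str.join "\n" (PySem.List.slice lines (some r.2) none)]
  else r.1

-- ===== PRECONDITION & SPEC =====
def Spec_doe2_object_blocks (inp_file_contents : String) (out : List String) : Prop := out = doe2_object_blocks_alt inp_file_contents
instance (inp_file_contents : String) (out : List String) : Decidable (Spec_doe2_object_blocks inp_file_contents out) := by unfold Spec_doe2_object_blocks; infer_instance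

-- ===== CLAIM (what is proved, stated in full; the proofs are below) =====
def Claim_equal_doe2_object_blocks : Prop := ∀ (inp_file_contents : String), Dom_doe2_object_blocks inp_file_contents → Spec_doe2_object_blocks inp_file_contents (doe2_object_blocks inp_file_contents)

-- ===== LEMMAS AND PROOFS =====

-- chunked characterisation of A's fold: (blocks added, final buffer)
def pvProcA : List String → List String → List String × List String
  | buf, [] => ([], buf)
  | buf, l :: ls =>
    if pvIsEnd l then
      let rest := pvProcA [] ls
      ((if pvIsIgn ((buf ++ [l]).headD "") then [] else [PySem.Str.join "\n" (buf ++ [l])]) ++ rest.1,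
       rest.2)
    else pvProcA (buf ++ [l]) ls

def pvResA (buf ls : List String) : List String :=
  (pvProcA buf ls).1 ++
    (if (pvProcA buf ls).2 = [] then [] else [PySem.Str.join "\n" (pvProcA buf ls).2])

-- the boundary-index table, relative, over Nat
def pvEnds : List String → List Nat
  | [] => []
  | l :: ls => (if pvIsEnd l then [0] else []) ++ (pvEnds ls).map (· + 1)

-- B's whole tail computation (fold over the remaining boundary table, then the unconditional tail)
def pvFinB (lines : List String) (es : List Int) (st : List String × Int) : List String :=
  let r := es.foldl (pvStepB lines) st
  if r.2 < (lines.length : Int) then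
    r.1 ++ [PySem.Str.join "\n" (PySem.List.slice lines (some r.2) none)]
  else r.1

lemma pv_foldA (ls : List String) : ∀ bs buf,
    ls.foldl pvStepA (bs, buf) = (bs ++ (pvProcA buf ls).1, (pvProcA buf ls).2) := by
  induction ls with
  | nil => intro bs buf; simp [pvProcA]
  | cons l ls ih =>
    intro bs buf
    simp only [List.foldl_cons, pvStepA, pvProcA]
    by_cases he : pvIsEnd l
    · have hbr : (buf ++ [l]).headD "" = buf.head?.getD l := by cases buf <;> simp
      by_cases hi : pvIsIgn (buf.head?.getD l)
      · rw [if_pos he, if_pos he, if_neg (by simp [hi]), if_pos (by rw [hbr]; exact hi), ih]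
        simp
      · rw [if_pos he, if_pos he, if_pos (by simp [hi]), if_neg (by rw [hbr]; exact hi), ih]
        simp
    · rw [if_neg he, if_neg he, ih]

lemma pv_ends_enum (ls : List String) : ∀ s : Nat,
    ((PySem.List.enumerate ls (s : Int)).filter fun p => pvIsEnd p.2).map (·.1)
      = (pvEnds ls).map (fun k => ((k + s : Nat) : Int)) := by
  induction ls with
  | nil => intro s; simp [PySem.List.enumerate_nil, pvEnds]
  | cons l ls ih =>
    intro s
    rw [PySem.List.enumerate_cons]
    have h1 : ((s : Int) + 1) = ((s + 1 : Nat) : Int) := by push_cast; ring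
    rw [h1]
    by_cases he : pvIsEnd l
    · rw [List.filter_cons_of_pos (by simpa using he), List.map_cons, ih (s + 1)]
      rw [show pvEnds (l :: ls) = [0] ++ (pvEnds ls).map (· + 1) by simp [pvEnds, he]]
      simp only [List.map_append, List.map_cons, List.map_nil, List.map_map, List.cons_append,
        List.nil_append, List.cons.injEq]
      refine ⟨by push_cast; ring, List.map_congr_left fun k _ => ?_⟩
      simp only [Function.comp_apply]
      push_cast; ring
    · rw [List.filter_cons_of_neg (by simpa using he), ih (s + 1)]
      rw [show pvEnds (l :: ls) = (pvEnds ls).map (· + 1) by simp [pvEnds, he]]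
      simp only [List.map_map]
      refine List.map_congr_left fun k _ => ?_
      simp only [Function.comp_apply]
      push_cast; ring

lemma pvFinB_nil (lines : List String) (st : List String × Int) :
    pvFinB lines [] st =
      (if st.2 < (lines.length : Int) then
        st.1 ++ [PySem.Str.join "\n" (PySem.List.slice lines (some st.2) none)]
      else st.1) := rfl

lemma pvFinB_cons (lines : List String) (e : Int) (es : List Int) (st : List String × Int) :
    pvFinB lines (e :: es) st = pvFinB lines es (pvStepB lines st e) := by
  unfold pvFinB
  rw [List.foldl_cons]

lemma pvStepB_def (lines : List String) (st : List String × Int) (e : Int) :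
    pvStepB lines st e =
      (if !pvIsIgn ((PySem.List.slice lines (some st.2) (some (e + 1))).headD "") then
          st.1 ++ [PySem.Str.join "\n" (PySem.List.slice lines (some st.2) (some (e + 1)))]
        else st.1,
       e + 1) := rfl

lemma pv_shift1 (es : List Nat) : ∀ (x : String) (lines : List String) (bs : List String) (s : Nat),
    pvFinB (x :: lines) (es.map fun k => ((k + 1 : Nat) : Int)) (bs, ((s + 1 : Nat) : Int))
      = pvFinB lines (es.map fun k => ((k : Nat) : Int)) (bs, (s : Int)) := by
  induction es with
  | nil =>
    intro x lines bs s
    rw [List.map_nil, List.map_nil, pvFinB_nil, pvFinB_nil]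
    have hc : (((s + 1 : Nat) : Int) < ((x :: lines).length : Int)) ↔ ((s : Int) < (lines.length : Int)) := by
      simp only [List.length_cons]
      push_cast
      omega
    have hs : PySem.List.slice (x :: lines) (some ((s + 1 : Nat) : Int)) none
        = PySem.List.slice lines (some (s : Int)) none := by
      rw [PySem.List.slice_from_natCast, PySem.List.slice_from_natCast, List.drop_succ_cons]
    by_cases h : (s : Int) < (lines.length : Int)
    · rw [if_pos (hc.mpr h), if_pos h, hs]
    · rw [if_neg (fun hh => h (hc.mp hh)), if_neg h]
  | cons e es ih =>
    intro x lines bs s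
    rw [List.map_cons, List.map_cons, pvFinB_cons, pvFinB_cons, pvStepB_def, pvStepB_def]
    have hseg : PySem.List.slice (x :: lines) (some ((s + 1 : Nat) : Int)) (some (((e + 1 : Nat) : Int) + 1))
        = PySem.List.slice lines (some (s : Int)) (some ((e : Int) + 1)) := by
      have h1 : (((e + 1 : Nat) : Int) + 1) = ((e + 2 : Nat) : Int) := by push_cast; ring
      have h2 : ((e : Int) + 1) = ((e + 1 : Nat) : Int) := by push_cast; ring
      rw [h1, h2, PySem.List.slice_natCast, PySem.List.slice_natCast]
      simp only [List.drop_succ_cons]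
      congr 1
      omega
    rw [hseg]
    have h3 : (((e + 1 : Nat) : Int) + 1) = (((e + 1) + 1 : Nat) : Int) := by push_cast; ring
    have h4 : ((e : Int) + 1) = ((e + 1 : Nat) : Int) := by push_cast; ring
    rw [h3, h4]
    exact ih x lines _ (e + 1)

lemma pv_shift (p : List String) : ∀ (es : List Nat) (lines : List String) (bs : List String),
    pvFinB (p ++ lines) (es.map fun k => ((k + p.length : Nat) : Int)) (bs, ((p.length : Nat) : Int))
      = pvFinB lines (es.map fun k => ((k : Nat) : Int)) (bs, (0 : Int)) := by
  induction p with
  | nil =>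
    intro es lines bs
    norm_num
  | cons x p ih =>
    intro es lines bs
    have h1 : (es.map fun k => ((k + (x :: p).length : Nat) : Int))
        = ((es.map (fun k => k + p.length)).map fun k => ((k + 1 : Nat) : Int)) := by
      simp only [List.map_map, List.length_cons]
      refine List.map_congr_left fun k _ => ?_
      simp only [Function.comp_apply]
      push_cast; ring
    have h2 : (((x :: p).length : Nat) : Int) = (((p.length + 1 : Nat)) : Int) := by simp
    rw [h1, h2, List.cons_append, pv_shift1 (es.map (fun k => k + p.length)) x (p ++ lines) bs p.length]
    have h3 : ((es.map (fun k => k + p.length)).map fun k => ((k : Nat) : Int))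
        = (es.map fun k => ((k + p.length : Nat) : Int)) := by
      simp [List.map_map, Function.comp]
    rw [h3]
    exact ih es lines bs

lemma pv_main (ls : List String) : ∀ (buf bs : List String),
    pvFinB (buf ++ ls) ((pvEnds ls).map fun k => ((k + buf.length : Nat) : Int)) (bs, (0 : Int))
      = bs ++ pvResA buf ls := by
  induction ls with
  | nil =>
    intro buf bs
    rw [List.append_nil]
    simp only [pvEnds, List.map_nil, pvResA, pvProcA]
    rw [pvFinB_nil]
    by_cases h : buf = []
    · subst h; simp
    · have hl : (0 : Int) < (buf.length : Int) := by
        have := List.length_pos_iff.mpr h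
        exact_mod_cast this
      rw [if_pos hl, if_neg h]
      congr 2
      rw [show (0 : Int) = ((0 : Nat) : Int) from rfl, PySem.List.slice_from_natCast]
      simp
  | cons l ls ih =>
    intro buf bs
    by_cases he : pvIsEnd l
    · -- head line terminates a block
      rw [show pvEnds (l :: ls) = [0] ++ (pvEnds ls).map (· + 1) by simp [pvEnds, he]]
      simp only [List.map_cons, List.cons_append, List.nil_append]
      rw [pvFinB_cons, pvStepB_def]
      have hseg : PySem.List.slice (buf ++ l :: ls) (some (0 : Int)) (some (((0 + buf.length : Nat) : Int) + 1))
          = buf ++ [l] := by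
        have h1 : (((0 + buf.length : Nat) : Int) + 1) = ((buf.length + 1 : Nat) : Int) := by push_cast; ring
        rw [h1, PySem.List.slice_zero_start, PySem.List.slice_to_natCast, List.take_append]
        simp
      rw [hseg]
      have h5 : (((0 + buf.length : Nat) : Int) + 1) = (((buf ++ [l]).length : Nat) : Int) := by
        simp only [List.length_append, List.length_cons, List.length_nil]
        push_cast; ring
      have h6 : ((pvEnds ls).map (· + 1)).map (fun k => ((k + buf.length : Nat) : Int))
          = (pvEnds ls).map fun k => ((k + (buf ++ [l]).length : Nat) : Int) := by
        simp only [List.map_map, List.length_append, List.length_cons, List.length_nil]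
        refine List.map_congr_left fun k _ => ?_
        simp only [Function.comp_apply]
        push_cast; ring
      rw [h5, h6]
      set bs' := (if !pvIsIgn ((buf ++ [l]).headD "") then bs ++ [PySem.Str.join "\n" (buf ++ [l])] else bs) with hbs'
      have hshift := pv_shift (buf ++ [l]) (pvEnds ls) ls bs'
      rw [show buf ++ l :: ls = (buf ++ [l]) ++ ls by simp, hshift]
      have h8 := ih [] bs'
      rw [List.nil_append] at h8
      rw [show ((pvEnds ls).map fun k => ((k : Nat) : Int))
            = ((pvEnds ls).map fun k => ((k + ([] : List String).length : Nat) : Int)) by simp]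
      rw [h8]
      -- now reduce the RHS
      rw [show pvResA buf (l :: ls) =
            (if pvIsIgn (buf.head?.getD l) then [] else [PySem.Str.join "\n" (buf ++ [l])]) ++ pvResA [] ls by
          simp [pvResA, pvProcA, he]]
      have hbr : (buf ++ [l]).headD "" = buf.head?.getD l := by cases buf <;> simp
      rw [hbs', hbr]
      by_cases hi : pvIsIgn (buf.head?.getD l)
      · simp [hi]
      · simp [hi]
    · -- head line does not terminate a block: absorb it into the pending prefix
      have h6 : (pvEnds (l :: ls)).map (fun k => ((k + buf.length : Nat) : Int))
          = (pvEnds ls).map fun k => ((k + (buf ++ [l]).length : Nat) : Int) := by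
        rw [show pvEnds (l :: ls) = (pvEnds ls).map (· + 1) by simp [pvEnds, he]]
        simp only [List.map_map, List.length_append, List.length_cons, List.length_nil]
        refine List.map_congr_left fun k _ => ?_
        simp only [Function.comp_apply]
        push_cast; ring
      rw [show buf ++ l :: ls = (buf ++ [l]) ++ ls by simp, h6, ih (buf ++ [l]) bs]
      rw [show pvResA buf (l :: ls) = pvResA (buf ++ [l]) ls by simp [pvResA, pvProcA, he]]

-- ===== VERDICT (by name: the statement is the Claim_ definition above) =====
theorem doe2_object_blocks_spec : Claim_equal_doe2_object_blocks := by
  intro inp _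
  show doe2_object_blocks inp = doe2_object_blocks_alt inp
  have hA : doe2_object_blocks inp =
      (if ((PySem.Str.splitlines inp).foldl pvStepA ([], ([] : List String))).2 ≠ [] then
        ((PySem.Str.splitlines inp).foldl pvStepA ([], [])).1 ++
          [PySem.Str.join "\n" ((PySem.Str.splitlines inp).foldl pvStepA ([], [])).2]
      else ((PySem.Str.splitlines inp).foldl pvStepA ([], [])).1) := rfl
  have hB : doe2_object_blocks_alt inp =
      pvFinB (PySem.Str.splitlines inp)
        (((PySem.List.enumerate (PySem.Str.splitlines inp) 0).filter fun p => pvIsEnd p.2).map (·.1))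
        ([], 0) := rfl
  set lines := PySem.Str.splitlines inp with hl
  have hends : ((PySem.List.enumerate lines 0).filter fun p => pvIsEnd p.2).map (·.1)
      = (pvEnds lines).map fun k => ((k + ([] : List String).length : Nat) : Int) := by
    have := pv_ends_enum lines 0
    simpa using this
  have hmain := pv_main lines [] []
  simp only [List.nil_append] at hmain
  rw [hA, hB, hends, hmain, pv_foldA lines [] []]
  simp only [pvResA, List.nil_append]
  by_cases h : (pvProcA [] lines).2 = []
  · simp [h]
  · simp [h]
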